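-- pv_equiv track=rewrite | github.com/guerinjeanmarc/pdf2neo4j-italian-tax | scripts/link_references_to_documents.py | categorize_references
-- ===== SOURCE A (Python) =====
-- from typing import Dict, List, Tuple
--
-- def categorize_references(
--     references: List[Dict],
--     documents: Dict[str, str]
-- ) -> Tuple[List[Dict], List[Dict], List[Dict]]:
--     """
--     Categorize references into matched, unmatched, and external.
--
--     Returns:
--         Tuple of (matched, unmatched, external) reference lists
--     """
--     matched = []
--     unmatched = []
--     external = []
--
--     for ref in references:
--         ref_id = ref['referenceId']
--
--         # Check if it's an external reference (law/decree)
--         if ref_id.startswith('EXT_') or ref_id.startswith('REF_'):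
--             external.append(ref)
--         # Check if it matches a document
--         elif ref_id in documents:
--             matched.append(ref)
--         # Our document type, but not in database
--         else:
--             unmatched.append(ref)
--
--     return matched, unmatched, external
-- ===== SOURCE B (Python) =====
-- from typing import Dict, List, Tuple
--
-- def categorize_references(
--     references: List[Dict],
--     documents: Dict[str, str]
-- ) -> Tuple[List[Dict], List[Dict], List[Dict]]:
--     """Categorize references into matched, unmatched, and external
--     with three independent comprehensions instead of one routing loop."""
--     def is_external(ref):
--         return ref['referenceId'].startswith(('EXT_', 'REF_'))
--
--     external = [r for r in references if is_external(r)]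
--     matched = [r for r in references
--                if not is_external(r) and r['referenceId'] in documents]
--     unmatched = [r for r in references
--                  if not is_external(r) and r['referenceId'] not in documents]
--     return matched, unmatched, external
-- ===== Notes on version B (the rewrite author's own statement) =====
-- stated objective: idiomatic
-- what changed: Replaces the single routing loop with three conditional accumulators by three independent filtering comprehensions (one per category), each re-stating the external-first priority in its predicate.
import Mathlib
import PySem

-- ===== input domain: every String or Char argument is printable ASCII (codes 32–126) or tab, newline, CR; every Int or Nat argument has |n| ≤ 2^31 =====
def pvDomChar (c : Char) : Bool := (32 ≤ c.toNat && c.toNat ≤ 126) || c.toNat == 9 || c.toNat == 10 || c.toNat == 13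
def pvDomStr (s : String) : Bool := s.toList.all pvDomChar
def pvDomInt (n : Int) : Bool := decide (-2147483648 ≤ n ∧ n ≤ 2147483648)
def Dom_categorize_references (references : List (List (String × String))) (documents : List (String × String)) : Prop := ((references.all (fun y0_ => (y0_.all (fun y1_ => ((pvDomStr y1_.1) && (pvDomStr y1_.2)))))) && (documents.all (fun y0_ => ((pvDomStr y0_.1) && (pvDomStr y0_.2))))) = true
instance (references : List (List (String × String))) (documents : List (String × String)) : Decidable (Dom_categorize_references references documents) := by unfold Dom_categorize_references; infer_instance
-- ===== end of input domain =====

-- B replaces A's single routing loop by three independent filtering comprehensions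
-- (one per category), each re-stating the external-first priority; return value only, no speed claim.

-- shared primitive of both Pythons: ref['referenceId'] (first match in the assoc list);
-- under Pre_ the key is present, so the `getD ""` default is never reached.
def pvRefId (ref : List (String × String)) : String :=
  ((PySem.Dict.mk ref).get? "referenceId").getD ""

-- ===== PORT A =====
def categorize_references (references : List (List (String × String))) (documents : List (String × String)) : (List (List (String × String))) × (List (List (String × String))) × (List (List (String × String))) :=
  let init : (List (List (String × String))) × (List (List (String × String))) × (List (List (String × String))) := ([], [], [])
  references.foldl (fun acc ref =>
    let (matched, unmatched, external) := acc
    let ref_id := pvRefId ref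
    if PySem.Str.startswith ref_id "EXT_" || PySem.Str.startswith ref_id "REF_" then
      (matched, unmatched, external ++ [ref])
    else if (PySem.Dict.mk documents).contains ref_id then
      (matched ++ [ref], unmatched, external)
    else
      (matched, unmatched ++ [ref], external)) init

-- ===== PORT B =====
def pvIsExternal (ref : List (String × String)) : Bool :=
  PySem.Str.startswith (pvRefId ref) "EXT_" || PySem.Str.startswith (pvRefId ref) "REF_"

def categorize_references_alt (references : List (List (String × String))) (documents : List (String × String)) : (List (List (String × String))) × (List (List (String × String))) × (List (List (String × String))) :=
  let external := references.filter (fun r => pvIsExternal r)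
  let matched := references.filter (fun r => !pvIsExternal r && (PySem.Dict.mk documents).contains (pvRefId r))
  let unmatched := references.filter (fun r => !pvIsExternal r && !(PySem.Dict.mk documents).contains (pvRefId r))
  (matched, unmatched, external)

-- ===== PRECONDITION & SPEC =====
-- Pre_ excludes exactly the references without a 'referenceId' key, on which
-- Python A (and Python B alike) raises KeyError.
def Pre_categorize_references (references : List (List (String × String))) (documents : List (String × String)) : Prop :=
  ∀ ref ∈ references, "referenceId" ∈ ref.map Prod.fst
instance (references : List (List (String × String))) (documents : List (String × String)) : Decidable (Pre_categorize_references references documents) := by unfold Pre_categorize_references; infer_instance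

def pvWitness_categorize_references : (List (List (String × String))) × (List (String × String)) :=
  ([[("referenceId", "EXT_1")], [("referenceId", "d1")], [("referenceId", "z")]], [("d1", "Doc 1")])

def Spec_categorize_references (references : List (List (String × String))) (documents : List (String × String)) (out : (List (List (String × String))) × (List (List (String × String))) × (List (List (String × String)))) : Prop := out = categorize_references_alt references documents
instance (references : List (List (String × String))) (documents : List (String × String)) (out : (List (List (String × String))) × (List (List (String × String))) × (List (List (String × String)))) : Decidable (Spec_categorize_references references documents out) := by unfold Spec_categorize_references; infer_instance

-- ===== CLAIM (what is proved, stated in full; the proofs are below) =====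
def Claim_equal_categorize_references : Prop := ∀ (references : List (List (String × String))) (documents : List (String × String)), Dom_categorize_references references documents → Pre_categorize_references references documents → Spec_categorize_references references documents (categorize_references references documents)

-- ===== LEMMAS AND PROOFS =====

-- the routing loop with arbitrary starting accumulators returns each accumulator
-- extended by the corresponding filter of the remaining input
theorem pv_loop_eq (documents : List (String × String))
    (refs : List (List (String × String)))
    (m u e : List (List (String × String))) :
    refs.foldl (fun acc ref =>
      let (matched, unmatched, external) := acc
      let ref_id := pvRefId ref
      if PySem.Str.startswith ref_id "EXT_" || PySem.Str.startswith ref_id "REF_" then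
        (matched, unmatched, external ++ [ref])
      else if (PySem.Dict.mk documents).contains ref_id then
        (matched ++ [ref], unmatched, external)
      else
        (matched, unmatched ++ [ref], external)) (m, u, e)
    = (m ++ refs.filter (fun r => !pvIsExternal r && (PySem.Dict.mk documents).contains (pvRefId r)),
       u ++ refs.filter (fun r => !pvIsExternal r && !(PySem.Dict.mk documents).contains (pvRefId r)),
       e ++ refs.filter (fun r => pvIsExternal r)) := by
  induction refs generalizing m u e with
  | nil => simp
  | cons r rs ih =>
    simp only [List.foldl_cons, List.filter_cons, pvIsExternal]
    cases hext : (PySem.Str.startswith (pvRefId r) "EXT_" || PySem.Str.startswith (pvRefId r) "REF_") with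
    | true =>
      simp only [hext, Bool.not_true, Bool.false_and, if_true, Bool.false_eq_true, if_false, ih]
      simp [pvIsExternal, Bool.not_or, Bool.and_assoc]
    | false =>
      cases hdoc : (PySem.Dict.mk documents).contains (pvRefId r) with
      | true =>
        simp only [hext, hdoc, Bool.not_false, Bool.true_and, Bool.not_true, if_true,
          Bool.false_eq_true, if_false, ih]
        simp [pvIsExternal, Bool.not_or, Bool.and_assoc]
      | false =>
        simp only [hext, hdoc, Bool.not_false, Bool.true_and, if_true,
          Bool.false_eq_true, if_false, ih]
        simp [pvIsExternal, Bool.not_or, Bool.and_assoc]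

-- ===== VERDICT (by name: the statement is the Claim_ definition above) =====
theorem categorize_references_spec : Claim_equal_categorize_references := by
  intro references documents _ _
  unfold Spec_categorize_references categorize_references categorize_references_alt
  simpa using pv_loop_eq documents references [] [] []
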